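-- pv_equiv track=rewrite | github.com/ilya-maltsev/waffy | learn/waffy_learn/analyzer.py | _generate_charset_regex
-- ===== SOURCE A (Python) =====
-- def _generate_charset_regex(values: list[str]) -> str:
--     """
--     Generate a character-class regex that covers the observed values.
--
--     Strategy: identify which character classes appear, build a regex
--     from the union of observed classes.
--     """
--     has_upper = False
--     has_lower = False
--     has_digit = False
--     has_space = False
--     special_chars: set[str] = set()
--
--     for v in values:
--         for ch in v:
--             if ch.isupper():
--                 has_upper = True
--             elif ch.islower():
--                 has_lower = True
--             elif ch.isdigit():
--                 has_digit = True
--             elif ch.isspace():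
--                 has_space = True
--             else:
--                 special_chars.add(ch)
--
--     # Build character class
--     parts = []
--     if has_upper and has_lower:
--         parts.append("a-zA-Z")
--     elif has_lower:
--         parts.append("a-z")
--     elif has_upper:
--         parts.append("A-Z")
--
--     if has_digit:
--         parts.append("0-9")
--
--     if has_space:
--         parts.append(r"\s")
--
--     # Escape and add special characters
--     for ch in sorted(special_chars):
--         if ch in r"\.^$*+?{}[]|()/":
--             parts.append(f"\\{ch}")
--         else:
--             parts.append(ch)
--
--     charset = "".join(parts)
--     return f"^[{charset}]+$"
-- ===== SOURCE B (Python) =====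
-- def _generate_charset_regex(values: list[str]) -> str:
--     """Table-first rewrite: collect the distinct characters once, then classify
--     them in separate passes instead of one interleaved populate-and-classify loop."""
--     chars: set[str] = set().union(*values)
--     has_upper = any(c.isupper() for c in chars)
--     has_lower = any(c.islower() for c in chars)
--     has_digit = any(c.isdigit() for c in chars)
--     has_space = any(c.isspace() for c in chars)
--     special = {c for c in chars
--                if not (c.isupper() or c.islower() or c.isdigit() or c.isspace())}
--     letters = ("a-zA-Z" if has_upper and has_lower
--                else "a-z" if has_lower
--                else "A-Z" if has_upper
--                else "")
--     esc = set(r"\.^$*+?{}[]|()/")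
--     specials = "".join("\\" + c if c in esc else c for c in sorted(special))
--     return ("^[" + letters + ("0-9" if has_digit else "")
--             + ("\\s" if has_space else "") + specials + "]+$")
-- ===== Notes on version B (the rewrite author's own statement) =====
-- stated objective: alternative
-- what changed: Replaces A's interleaved populate-and-classify nested per-character loop with a table-first structure: build the distinct-character set once with set().union(*values), then compute each class flag as a separate any() pass over that set and the specials as a set comprehension, assembling the regex as one expression.
import Mathlib
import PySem

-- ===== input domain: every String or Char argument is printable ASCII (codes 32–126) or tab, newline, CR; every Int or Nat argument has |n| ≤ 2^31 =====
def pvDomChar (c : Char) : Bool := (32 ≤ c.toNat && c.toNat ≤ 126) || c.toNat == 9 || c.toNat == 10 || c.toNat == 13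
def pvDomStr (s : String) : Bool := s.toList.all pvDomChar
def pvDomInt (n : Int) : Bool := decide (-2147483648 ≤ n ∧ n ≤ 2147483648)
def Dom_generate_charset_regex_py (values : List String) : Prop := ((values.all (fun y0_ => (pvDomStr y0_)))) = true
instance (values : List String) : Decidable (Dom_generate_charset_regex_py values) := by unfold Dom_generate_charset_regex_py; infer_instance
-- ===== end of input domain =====

-- B collects the distinct characters once (set().union(*values)) and classifies that set in
-- separate passes, instead of A's interleaved per-character populate-and-classify loop.

-- ===== PORT A =====
-- characters Python A escapes: r"\.^$*+?{}[]|()/"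
def pvEscChars : List Char := ['\\', '.', '^', '$', '*', '+', '?', '{', '}', '[', ']', '|', '(', ')', '/']

-- state: (has_upper, has_lower, has_digit, has_space, special_chars)
def pvStepA (st : Bool × Bool × Bool × Bool × PySem.Set Char) (ch : Char) :
    Bool × Bool × Bool × Bool × PySem.Set Char :=
  let (hu, hl, hd, hs, sp) := st
  if PySem.Chars.isupper ch then (true, hl, hd, hs, sp)
  else if PySem.Chars.islower ch then (hu, true, hd, hs, sp)
  else if PySem.Chars.isdigit ch then (hu, hl, true, hs, sp)
  else if PySem.Chars.isspace ch then (hu, hl, hd, true, sp)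
  else (hu, hl, hd, hs, PySem.Set.add sp ch)

def generate_charset_regex_py (values : List String) : String :=
  let st := values.foldl (fun st v => v.toList.foldl pvStepA st)
      (false, false, false, false, (PySem.Set.empty : PySem.Set Char))
  let hu := st.1; let hl := st.2.1; let hd := st.2.2.1; let hs := st.2.2.2.1
  let sp := st.2.2.2.2
  let parts : List String :=
    if hu && hl then ["a-zA-Z"] else if hl then ["a-z"] else if hu then ["A-Z"] else []
  let parts := parts ++ (if hd then ["0-9"] else [])
  let parts := parts ++ (if hs then ["\\s"] else [])
  let parts := (PySem.List.sorted sp (fun c => c)).foldl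
      (fun ps ch => if ch ∈ pvEscChars then ps ++ [String.ofList ['\\', ch]] else ps ++ [String.ofList [ch]])
      parts
  let charset := PySem.Str.join "" parts
  "^[" ++ charset ++ "]+$"

-- ===== PORT B =====
def pvIsSpecialB (c : Char) : Bool :=
  !(PySem.Chars.isupper c || PySem.Chars.islower c || PySem.Chars.isdigit c || PySem.Chars.isspace c)

def pvEscSetB : PySem.Set Char := PySem.Set.ofList pvEscChars

def generate_charset_regex_py_alt (values : List String) : String :=
  let chars : PySem.Set Char :=
    values.foldl (fun s v => PySem.Set.union s v.toList) PySem.Set.empty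
  let has_upper := chars.any PySem.Chars.isupper
  let has_lower := chars.any PySem.Chars.islower
  let has_digit := chars.any PySem.Chars.isdigit
  let has_space := chars.any PySem.Chars.isspace
  let special : PySem.Set Char := PySem.Set.ofList (chars.filter pvIsSpecialB)
  let letters : String :=
    if has_upper && has_lower then "a-zA-Z"
    else if has_lower then "a-z"
    else if has_upper then "A-Z"
    else ""
  let specials := PySem.Str.join ""
      ((PySem.List.sorted special (fun c => c)).map
        (fun c => if PySem.Set.contains pvEscSetB c then String.ofList ['\\', c] else String.ofList [c]))
  "^[" ++ letters ++ (if has_digit then "0-9" else "")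
    ++ (if has_space then "\\s" else "") ++ specials ++ "]+$"

-- ===== PRECONDITION & SPEC =====
def Spec_generate_charset_regex_py (values : List String) (out : String) : Prop := out = generate_charset_regex_py_alt values
instance (values : List String) (out : String) : Decidable (Spec_generate_charset_regex_py values out) := by unfold Spec_generate_charset_regex_py; infer_instance

-- ===== CLAIM (what is proved, stated in full; the proofs are below) =====
def Claim_equal_generate_charset_regex_py : Prop := ∀ (values : List String), Dom_generate_charset_regex_py values → Spec_generate_charset_regex_py values (generate_charset_regex_py values)


-- ===== LEMMAS AND PROOFS =====
-- the four character classes of A's elif chain are pairwise disjoint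
theorem pvLowerNotUpper (c : Char) (h : PySem.Chars.islower c = true) : PySem.Chars.isupper c = false := by
  simp [PySem.Chars.islower, Char.le_def, UInt32.le_iff_toNat_le] at h
  simp [PySem.Chars.isupper, Char.le_def, UInt32.le_iff_toNat_le]
  omega

theorem pvDigitNotUpper (c : Char) (h : PySem.Chars.isdigit c = true) : PySem.Chars.isupper c = false := by
  simp [PySem.Chars.isdigit, Char.le_def, UInt32.le_iff_toNat_le] at h
  simp [PySem.Chars.isupper, Char.le_def, UInt32.le_iff_toNat_le]
  omega

theorem pvDigitNotLower (c : Char) (h : PySem.Chars.isdigit c = true) : PySem.Chars.islower c = false := by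
  simp [PySem.Chars.isdigit, Char.le_def, UInt32.le_iff_toNat_le] at h
  simp [PySem.Chars.islower, Char.le_def, UInt32.le_iff_toNat_le]
  omega

theorem pvSpaceNotUpper (c : Char) (h : PySem.Chars.isspace c = true) : PySem.Chars.isupper c = false := by
  simp only [PySem.Chars.isspace, Bool.or_eq_true, Bool.and_eq_true, decide_eq_true_eq] at h
  simp [PySem.Chars.isupper, Char.le_def, UInt32.le_iff_toNat_le]
  have hb : c.toNat = c.val.toNat := rfl
  omega

theorem pvSpaceNotLower (c : Char) (h : PySem.Chars.isspace c = true) : PySem.Chars.islower c = false := by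
  simp only [PySem.Chars.isspace, Bool.or_eq_true, Bool.and_eq_true, decide_eq_true_eq] at h
  simp [PySem.Chars.islower, Char.le_def, UInt32.le_iff_toNat_le]
  have hb : c.toNat = c.val.toNat := rfl
  omega

theorem pvSpaceNotDigit (c : Char) (h : PySem.Chars.isspace c = true) : PySem.Chars.isdigit c = false := by
  simp only [PySem.Chars.isspace, Bool.or_eq_true, Bool.and_eq_true, decide_eq_true_eq] at h
  simp [PySem.Chars.isdigit, Char.le_def, UInt32.le_iff_toNat_le]
  have hb : c.toNat = c.val.toNat := rfl
  omega

-- A's nested per-value loop is the loop over the concatenation of all values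
theorem pvFoldNest (values : List String) :
    ∀ st, values.foldl (fun st v => v.toList.foldl pvStepA st) st
      = (values.flatMap String.toList).foldl pvStepA st := by
  induction values with
  | nil => intro st; rfl
  | cons v vs ih => intro st; simp [List.flatMap_cons, List.foldl_append, ih]

-- characterisation of A's loop state
theorem pvFoldA (cs : List Char) :
    ∀ st : Bool × Bool × Bool × Bool × PySem.Set Char,
      cs.foldl pvStepA st =
        (st.1 || cs.any PySem.Chars.isupper,
         st.2.1 || cs.any PySem.Chars.islower,
         st.2.2.1 || cs.any PySem.Chars.isdigit,
         st.2.2.2.1 || cs.any PySem.Chars.isspace,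
         PySem.Set.update st.2.2.2.2 (cs.filter pvIsSpecialB)) := by
  induction cs with
  | nil => intro st; simp [PySem.Set.update]
  | cons c cs ih =>
    intro st
    obtain ⟨hu, hl, hd, hs, sp⟩ := st
    rw [List.foldl_cons, ih]
    by_cases h1 : PySem.Chars.isupper c = true
    · simp [pvStepA, pvIsSpecialB, h1, pvLowerNotUpper, pvDigitNotUpper, pvSpaceNotUpper,
            Bool.or_assoc]
      constructor
      · cases hl <;> simp <;> intro h <;> exact absurd (pvLowerNotUpper c h) (by simp [h1])
      constructor
      · cases hd <;> simp <;> intro h <;> exact absurd (pvDigitNotUpper c h) (by simp [h1])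
      · cases hs <;> simp <;> intro h <;> exact absurd (pvSpaceNotUpper c h) (by simp [h1])
    · by_cases h2 : PySem.Chars.islower c = true
      · simp [pvStepA, pvIsSpecialB, h1, h2, Bool.or_assoc]
        constructor
        · cases hd <;> simp <;> intro h <;> exact absurd (pvDigitNotLower c h) (by simp [h2])
        · cases hs <;> simp <;> intro h <;> exact absurd (pvSpaceNotLower c h) (by simp [h2])
      · by_cases h3 : PySem.Chars.isdigit c = true
        · simp [pvStepA, pvIsSpecialB, h1, h2, h3, Bool.or_assoc]
          cases hs <;> simp <;> intro h <;> exact absurd (pvSpaceNotDigit c h) (by simp [h3])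
        · by_cases h4 : PySem.Chars.isspace c = true
          · simp [pvStepA, pvIsSpecialB, h1, h2, h3, h4, Bool.or_assoc]
          · simp [pvStepA, pvIsSpecialB, h1, h2, h3, h4, Bool.or_assoc, PySem.Set.update]

-- B's running union is set(all characters)
theorem pvFoldUnion (values : List String) :
    ∀ s : PySem.Set Char, values.foldl (fun s v => PySem.Set.union s v.toList) s
      = PySem.Set.update s (values.flatMap String.toList) := by
  induction values with
  | nil => intro s; rfl
  | cons v vs ih =>
    intro s
    rw [List.foldl_cons, ih]
    simp [PySem.Set.union, PySem.Set.update, List.flatMap_cons, List.foldl_append]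

theorem pvAnyOfList (cs : List Char) (p : Char → Bool) :
    (PySem.Set.ofList cs).any p = cs.any p := by
  rw [Bool.eq_iff_iff]
  simp only [List.any_eq_true]
  constructor
  · rintro ⟨x, hx, hp⟩; exact ⟨x, (PySem.Set.mem_ofList cs x).mp hx, hp⟩
  · rintro ⟨x, hx, hp⟩; exact ⟨x, (PySem.Set.mem_ofList cs x).mpr hx, hp⟩

theorem pvUpdateEmpty (l : List Char) :
    PySem.Set.update PySem.Set.empty l = PySem.Set.ofList l := rfl

-- both programs sort the same set of special characters
theorem pvSortedEq (cs : List Char) :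
    PySem.List.sorted (PySem.Set.ofList (cs.filter pvIsSpecialB)) (fun c => c) =
    PySem.List.sorted (PySem.Set.ofList ((PySem.Set.ofList cs).filter pvIsSpecialB)) (fun c => c) := by
  apply PySem.List.sorted_eq_sorted_of_perm _ _ _ (fun a b h => h)
  rw [List.perm_ext_iff_of_nodup (PySem.Set.nodup_ofList _) (PySem.Set.nodup_ofList _)]
  intro a
  simp [PySem.Set.mem_ofList, List.mem_filter]

theorem pvEscCond (c : Char) {α : Type} (x y : α) :
    (if PySem.Set.contains pvEscSetB c then x else y) = (if c ∈ pvEscChars then x else y) := by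
  have hset : pvEscSetB = pvEscChars := by decide
  by_cases h : c ∈ pvEscChars
  · simp [hset, PySem.Set.contains, h]
  · simp [hset, PySem.Set.contains, h]

-- A's append-one-by-one loop over the sorted specials is a map
theorem pvFoldParts (L : List Char) :
    ∀ ps : List String,
      L.foldl (fun ps ch => if ch ∈ pvEscChars then ps ++ [String.ofList ['\\', ch]]
                            else ps ++ [String.ofList [ch]]) ps
      = ps ++ L.map (fun ch => if ch ∈ pvEscChars then String.ofList ['\\', ch]
                               else String.ofList [ch]) := by
  induction L with
  | nil => intro ps; simp
  | cons c L ih =>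
    intro ps
    rw [List.foldl_cons, ih]
    by_cases h : c ∈ pvEscChars <;> simp [h]

theorem pvJoinCons (s : String) (rest : List String) :
    PySem.Str.join "" (s :: rest) = s ++ PySem.Str.join "" rest := by
  apply String.toList_inj.mp
  simp only [PySem.Str.toList_join, PySem.Chars.join, List.intercalate, List.map_cons,
    String.toList_append]
  cases rest with
  | nil => simp
  | cons b t => simp

-- ===== VERDICT (by name: the statement is the Claim_ definition above) =====
theorem generate_charset_regex_py_spec : Claim_equal_generate_charset_regex_py := by
  intro values _
  unfold Spec_generate_charset_regex_py generate_charset_regex_py generate_charset_regex_py_alt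
  rw [pvFoldNest, pvFoldA, pvFoldUnion]
  simp only [Bool.false_or, pvUpdateEmpty, pvAnyOfList, pvEscCond, pvFoldParts]
  rw [pvSortedEq]
  set cs := values.flatMap String.toList with hcs
  by_cases b1 : cs.any PySem.Chars.isupper <;>
    by_cases b2 : cs.any PySem.Chars.islower <;>
      by_cases b3 : cs.any PySem.Chars.isdigit <;>
        by_cases b4 : cs.any PySem.Chars.isspace <;>
          simp [b1, b2, b3, b4, pvJoinCons, ← String.append_assoc, -List.any_eq_true]
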